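-- pv_equiv track=rewrite | github.com/yannickloth/W33-Theory | tools/w33_e8_root_line_bijection.py | compute_triality_distribution
-- ===== SOURCE A (Python) =====
-- from collections import Counter, defaultdict
--
-- def compute_triality_distribution(edges, vertices):
--     """Compute how edges distribute across triality axes."""
--     # Define triality axes by position pair complements
--     triality_axes = {
--         "V": (frozenset({0, 1}), frozenset({2, 3})),
--         "S+": (frozenset({0, 2}), frozenset({1, 3})),
--         "S-": (frozenset({0, 3}), frozenset({1, 2})),
--     }
--
--     # Count edges by which axis they "respect"
--     axis_counts = defaultdict(int)
--     edge_axis = {}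
--
--     for idx, (i, j) in enumerate(edges):
--         v1, v2 = vertices[i], vertices[j]
--         nz1 = frozenset(k for k in range(4) if v1[k] != 0)
--         nz2 = frozenset(k for k in range(4) if v2[k] != 0)
--
--         # Determine which triality axis this edge aligns with
--         for axis_name, (p1, p2) in triality_axes.items():
--             # Check if edge vertices separate along this axis
--             if nz1.issubset(p1) or nz1.issubset(p2):
--                 if nz2.issubset(p1) or nz2.issubset(p2):
--                     axis_counts[axis_name] += 1
--                     edge_axis[idx] = axis_name
--                     break
--
--     return dict(axis_counts), edge_axis
-- ===== SOURCE B (Python) =====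
-- def compute_triality_distribution(edges, vertices):
--     """Compute how edges distribute across triality axes."""
--     # Each triality axis splits positions {0,1,2,3} into two complementary halves.
--     AXIS_NAMES = ["V", "S+", "S-"]
--     AXIS_SIDES = [([0, 1], [2, 3]), ([0, 2], [1, 3]), ([0, 3], [1, 2])]
--
--     # Precompute, for each of the 16 possible nonzero-position patterns (as a
--     # bitmask m), the ordered list of axes compatible with that pattern.
--     table = []
--     for m in range(16):
--         bits = []
--         t = m
--         for _ in range(4):
--             bits.append(t % 2)
--             t //= 2
--         axes = []
--         for a in range(3):
--             s1, s2 = AXIS_SIDES[a]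
--             if all(bits[k] == 0 for k in s2) or all(bits[k] == 0 for k in s1):
--                 axes.append(a)
--         table.append(axes)
--
--     def mask(v):
--         m = 0
--         p = 1
--         for k in range(4):
--             if v[k] != 0:
--                 m += p
--             p *= 2
--         return m
--
--     axis_counts = {}
--     edge_axis = {}
--     for idx, (i, j) in enumerate(edges):
--         c1 = table[mask(vertices[i])]
--         c2 = table[mask(vertices[j])]
--         common = [a for a in c1 if a in c2]
--         if common:
--             name = AXIS_NAMES[common[0]]
--             axis_counts[name] = axis_counts.get(name, 0) + 1
--             edge_axis[idx] = name
--     return axis_counts, edge_axis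
-- ===== Notes on version B (the rewrite author's own statement) =====
-- stated objective: alternative
-- what changed: Replaces A's per-edge frozenset construction and per-axis subset tests with a precomputed 16-entry table mapping each nonzero-position bitmask to its ordered compatible axes, so each edge is classified by intersecting two table lookups and taking the first common axis.
import Mathlib
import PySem

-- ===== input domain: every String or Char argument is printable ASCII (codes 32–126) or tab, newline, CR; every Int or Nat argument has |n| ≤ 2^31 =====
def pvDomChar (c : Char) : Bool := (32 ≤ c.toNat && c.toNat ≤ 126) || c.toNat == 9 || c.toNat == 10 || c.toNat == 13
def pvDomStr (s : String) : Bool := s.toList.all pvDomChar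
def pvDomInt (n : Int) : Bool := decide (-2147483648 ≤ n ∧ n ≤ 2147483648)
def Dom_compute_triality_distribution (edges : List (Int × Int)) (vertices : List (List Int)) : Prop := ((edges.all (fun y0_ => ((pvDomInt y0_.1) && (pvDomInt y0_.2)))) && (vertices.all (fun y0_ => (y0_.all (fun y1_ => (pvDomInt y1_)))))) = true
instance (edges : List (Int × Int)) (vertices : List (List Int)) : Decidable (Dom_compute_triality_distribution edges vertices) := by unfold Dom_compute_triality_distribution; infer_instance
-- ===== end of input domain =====

-- B replaces A's per-edge frozenset subset tests by a precomputed 16-entry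
-- table (nonzero-position bitmask → compatible axes) and a first-common-axis
-- lookup per edge; objective: alternative decomposition, not claimed faster.

-- ===== PORT A =====
def pvA_axes : List (String × (List Int × List Int)) :=
  [("V", ([0, 1], [2, 3])), ("S+", ([0, 2], [1, 3])), ("S-", ([0, 3], [1, 2]))]

-- nz = frozenset(k for k in range(4) if v[k] != 0); v[k] exact under Pre_ (len ≥ 4)
def pvA_nz (v : List Int) : List Int :=
  (PySem.List.pyRange 0 4 1).filter (fun k => PySem.List.pyGetD v k 0 != 0)

-- frozenset.issubset (the lists hold distinct elements)
def pvA_subset (s p : List Int) : Bool := s.all (fun k => p.contains k)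

-- the inner 'for axis_name, (p1, p2) in triality_axes.items(): … break'
def pvA_find (nz1 nz2 : List Int) : List (String × (List Int × List Int)) → Option String
  | [] => none
  | (name, (p1, p2)) :: rest =>
      if pvA_subset nz1 p1 || pvA_subset nz1 p2 then
        if pvA_subset nz2 p1 || pvA_subset nz2 p2 then some name
        else pvA_find nz1 nz2 rest
      else pvA_find nz1 nz2 rest

-- one iteration of A's edge loop (defaultdict increment = getD 0 + insert)
def pvA_step (vertices : List (List Int))
    (st : PySem.Dict String Int × PySem.Dict Int String) (p : Int × (Int × Int)) :
    PySem.Dict String Int × PySem.Dict Int String :=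
  let v1 := PySem.List.pyGetD vertices p.2.1 []
  let v2 := PySem.List.pyGetD vertices p.2.2 []
  match pvA_find (pvA_nz v1) (pvA_nz v2) pvA_axes with
  | some name => (st.1.insert name (st.1.getD name 0 + 1), st.2.insert p.1 name)
  | none => st

def compute_triality_distribution (edges : List (Int × Int)) (vertices : List (List Int)) :
    (List (String × Int)) × (List (Int × String)) :=
  let r := (PySem.List.enumerate edges 0).foldl (pvA_step vertices)
    ((PySem.Dict.empty : PySem.Dict String Int), (PySem.Dict.empty : PySem.Dict Int String))
  (r.1.items, r.2.items)

-- ===== PORT B =====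
def pvB_names : List String := ["V", "S+", "S-"]

def pvB_sides : List (List Int × List Int) :=
  [([0, 1], [2, 3]), ([0, 2], [1, 3]), ([0, 3], [1, 2])]

-- bits of m, least significant first (the inner 'bits' loop); m ≥ 0 here so
-- PySem.Int.mod/floordiv are exact Python % and //
def pvB_bits (m : Int) : List Int :=
  ((PySem.List.pyRange 0 4 1).foldl
    (fun (bt : List Int × Int) _ => (bt.1 ++ [PySem.Int.mod bt.2 2], PySem.Int.floordiv bt.2 2))
    ([], m)).1

-- the axes-list body of the table loop for one m
def pvB_axesOf (m : Int) : List Int :=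
  let bits := pvB_bits m
  (PySem.List.pyRange 0 3 1).foldl (fun axes a =>
    let s := PySem.List.pyGetD pvB_sides a ([], [])
    if (s.2.all fun k => PySem.List.pyGetD bits k 0 == 0) ||
       (s.1.all fun k => PySem.List.pyGetD bits k 0 == 0)
    then axes ++ [a] else axes) []

def pvB_table : List (List Int) :=
  (PySem.List.pyRange 0 16 1).foldl (fun tbl m => tbl ++ [pvB_axesOf m]) []

-- def mask(v): m = 0; p = 1; for k in range(4): …
def pvB_mask (v : List Int) : Int :=
  ((PySem.List.pyRange 0 4 1).foldl
    (fun (mp : Int × Int) k =>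
      (if PySem.List.pyGetD v k 0 != 0 then mp.1 + mp.2 else mp.1, mp.2 * 2))
    (0, 1)).1

-- one iteration of B's edge loop
def pvB_step (vertices : List (List Int))
    (st : PySem.Dict String Int × PySem.Dict Int String) (p : Int × (Int × Int)) :
    PySem.Dict String Int × PySem.Dict Int String :=
  let c1 := PySem.List.pyGetD pvB_table (pvB_mask (PySem.List.pyGetD vertices p.2.1 [])) []
  let c2 := PySem.List.pyGetD pvB_table (pvB_mask (PySem.List.pyGetD vertices p.2.2 [])) []
  match c1.filter (fun a => c2.contains a) with
  | [] => st
  | a :: _ =>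
      let name := PySem.List.pyGetD pvB_names a ""
      (st.1.insert name (st.1.getD name 0 + 1), st.2.insert p.1 name)

def compute_triality_distribution_alt (edges : List (Int × Int)) (vertices : List (List Int)) :
    (List (String × Int)) × (List (Int × String)) :=
  let r := (PySem.List.enumerate edges 0).foldl (pvB_step vertices)
    ((PySem.Dict.empty : PySem.Dict String Int), (PySem.Dict.empty : PySem.Dict Int String))
  (r.1.items, r.2.items)

-- ===== PRECONDITION & SPEC =====
-- A raises IndexError when an edge endpoint is out of range for `vertices`
-- (Python negative indexing allowed) or when a referenced vertex has fewer
-- than 4 coordinates; exactly those inputs are excluded.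
def Pre_compute_triality_distribution (edges : List (Int × Int)) (vertices : List (List Int)) : Prop :=
  ∀ p ∈ edges,
    PySem.Raise.InRange vertices.length p.1 ∧ PySem.Raise.InRange vertices.length p.2 ∧
    4 ≤ (PySem.List.pyGetD vertices p.1 []).length ∧ 4 ≤ (PySem.List.pyGetD vertices p.2 []).length
instance (edges : List (Int × Int)) (vertices : List (List Int)) : Decidable (Pre_compute_triality_distribution edges vertices) := by unfold Pre_compute_triality_distribution; infer_instance

def pvWitness_compute_triality_distribution : (List (Int × Int)) × List (List Int) :=
  ([(0, 1)], [[1, 0, 0, 0], [0, 0, 1, 0]])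

def Spec_compute_triality_distribution (edges : List (Int × Int)) (vertices : List (List Int)) (out : (List (String × Int)) × (List (Int × String))) : Prop := out = compute_triality_distribution_alt edges vertices
instance (edges : List (Int × Int)) (vertices : List (List Int)) (out : (List (String × Int)) × (List (Int × String))) : Decidable (Spec_compute_triality_distribution edges vertices out) := by unfold Spec_compute_triality_distribution; infer_instance

-- ===== CLAIM (what is proved, stated in full; the proofs are below) =====
def Claim_equal_compute_triality_distribution : Prop := ∀ (edges : List (Int × Int)) (vertices : List (List Int)), Dom_compute_triality_distribution edges vertices → Pre_compute_triality_distribution edges vertices → Spec_compute_triality_distribution edges vertices (compute_triality_distribution edges vertices)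

-- ===== LEMMAS AND PROOFS =====

-- per-vertex-pair agreement: A's axis search equals B's first common table axis
theorem pv_choose_eq (v1 v2 : List Int) :
    pvA_find (pvA_nz v1) (pvA_nz v2) pvA_axes =
      (match (PySem.List.pyGetD pvB_table (pvB_mask v1) []).filter
          (fun a => (PySem.List.pyGetD pvB_table (pvB_mask v2) []).contains a) with
       | [] => none
       | a :: _ => some (PySem.List.pyGetD pvB_names a "")) := by
  cases h10 : PySem.List.pyGetD v1 0 0 != 0 <;>
  cases h11 : PySem.List.pyGetD v1 1 0 != 0 <;>
  cases h12 : PySem.List.pyGetD v1 2 0 != 0 <;>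
  cases h13 : PySem.List.pyGetD v1 3 0 != 0 <;>
  cases h20 : PySem.List.pyGetD v2 0 0 != 0 <;>
  cases h21 : PySem.List.pyGetD v2 1 0 != 0 <;>
  cases h22 : PySem.List.pyGetD v2 2 0 != 0 <;>
  cases h23 : PySem.List.pyGetD v2 3 0 != 0 <;>
  simp only [pvA_nz, pvA_find, pvA_subset, pvA_axes, pvB_mask,
    (by decide : PySem.List.pyRange 0 4 1 = [0, 1, 2, 3]),
    List.filter, List.foldl, h10, h11, h12, h13, h20, h21, h22, h23] <;>
  decide

theorem pv_step_eq (vertices : List (List Int)) : pvA_step vertices = pvB_step vertices := by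
  funext st p
  simp only [pvA_step, pvB_step, pv_choose_eq]
  cases List.filter
      (fun a => (PySem.List.pyGetD pvB_table (pvB_mask (PySem.List.pyGetD vertices p.2.2 [])) []).contains a)
      (PySem.List.pyGetD pvB_table (pvB_mask (PySem.List.pyGetD vertices p.2.1 [])) []) <;> rfl

-- ===== VERDICT (by name: the statement is the Claim_ definition above) =====
theorem compute_triality_distribution_spec : Claim_equal_compute_triality_distribution := by
  intro edges vertices _ _
  unfold Spec_compute_triality_distribution compute_triality_distribution compute_triality_distribution_alt
  rw [pv_step_eq]
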